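-- pv_equiv track=rewrite | github.com/darshbs/py-practice | sortarrof01.py | canSort
-- ===== SOURCE A (Python) =====
-- def canSort(arr, frozen):
--
--     indices = []
--     for i in range(len(arr)):
--         if frozen[i] == 0:
--             indices.append(i)
--
--     values = []
--     for i in indices:
--         values.append(arr[i])
--
--     values.sort()
--
--     sorted_arr = arr[:]
--     for i in range(len(indices)):
--         sorted_arr[indices[i]] = values[i]
--
--     for i in range(len(sorted_arr) - 1):
--         if sorted_arr[i] > sorted_arr[i + 1]:
--             return False
--     return True
-- ===== SOURCE B (Python) =====
-- def canSort(arr, frozen):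
--     s = sorted(arr[i] for i in range(len(arr)) if frozen[i] == 0)
--     prev = None
--     t = 0  # number of free slots seen so far
--     for i in range(len(arr)):
--         if frozen[i] == 0:
--             t += 1
--         else:
--             v = arr[i]
--             if prev is not None and prev > v:
--                 return False
--             if t > 0 and s[t - 1] > v:
--                 return False
--             if t < len(s) and v > s[t]:
--                 return False
--             prev = v
--     return True
-- ===== Notes on version B (the rewrite author's own statement) =====
-- stated objective: alternative
-- what changed: B never builds or scans the merged array: it sorts the free values once and then checks only the frozen positions, verifying for each frozen value v (with t free slots before it) that the previous frozen value is <= v, that s[t-1] <= v and that v <= s[t]; sortedness inside runs of free slots is guaranteed by s being sorted, so the whole-array adjacent-pair scan of A disappears.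
import Mathlib
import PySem

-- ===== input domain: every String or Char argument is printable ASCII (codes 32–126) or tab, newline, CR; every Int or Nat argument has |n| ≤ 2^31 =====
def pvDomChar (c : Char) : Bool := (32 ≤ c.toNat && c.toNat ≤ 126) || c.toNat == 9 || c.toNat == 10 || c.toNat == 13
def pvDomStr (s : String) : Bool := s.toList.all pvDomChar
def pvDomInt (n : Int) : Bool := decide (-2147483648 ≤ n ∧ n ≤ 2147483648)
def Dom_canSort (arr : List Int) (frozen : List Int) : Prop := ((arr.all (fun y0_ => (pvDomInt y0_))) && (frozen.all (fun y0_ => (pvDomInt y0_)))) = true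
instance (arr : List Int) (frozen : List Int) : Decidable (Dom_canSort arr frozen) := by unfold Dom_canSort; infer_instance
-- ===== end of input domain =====

-- B never builds or scans the merged array that A constructs: it sorts the free values s once
-- and then checks only the frozen positions, comparing each frozen value against the previous
-- frozen value and against its sorted-free neighbours s[t-1], s[t] (t = free slots before it).
-- Return-value equivalence; neither program mutates its arguments.

-- ===== PORT A =====
def canSort (arr : List Int) (frozen : List Int) : Bool :=
  let indices := (PySem.List.pyRange 0 (arr.length : Int)).foldl
      (fun acc i => if PySem.List.pyGetD frozen i 0 == 0 then acc ++ [i] else acc) ([] : List Int)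
  let values0 := indices.foldl
      (fun acc i => acc ++ [PySem.List.pyGetD arr i 0]) ([] : List Int)
  let values := PySem.List.sorted values0 id
  let sortedArr := (PySem.List.pyRange 0 (indices.length : Int)).foldl
      (fun sa i => PySem.List.pySetD sa (PySem.List.pyGetD indices i 0) (PySem.List.pyGetD values i 0)) arr
  (PySem.List.pyRange 0 ((sortedArr.length : Int) - 1)).all
      (fun i => !(decide (PySem.List.pyGetD sortedArr i 0 > PySem.List.pyGetD sortedArr (i + 1) 0)))

-- ===== PORT B =====
-- the loop of Source B: t = free slots seen so far, prev = last frozen value seen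
def canSortAltGo (arr frozen s : List Int) : List Int → Int → Option Int → Bool
  | [], _, _ => true
  | i :: rest, t, prev =>
    if PySem.List.pyGetD frozen i 0 == 0 then
      canSortAltGo arr frozen s rest (t + 1) prev
    else
      let v := PySem.List.pyGetD arr i 0
      if (match prev with | some p => decide (p > v) | none => false) then false
      else if decide (t > 0) && decide (PySem.List.pyGetD s (t - 1) 0 > v) then false
      else if decide (t < (s.length : Int)) && decide (v > PySem.List.pyGetD s t 0) then false
      else canSortAltGo arr frozen s rest t (some v)

def canSort_alt (arr : List Int) (frozen : List Int) : Bool :=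
  let s := PySem.List.sorted
      ((PySem.List.pyRange 0 (arr.length : Int)).foldl
        (fun acc i => if PySem.List.pyGetD frozen i 0 == 0 then acc ++ [PySem.List.pyGetD arr i 0] else acc)
        ([] : List Int)) id
  canSortAltGo arr frozen s (PySem.List.pyRange 0 (arr.length : Int)) 0 none

-- ===== PRECONDITION & SPEC =====
-- Pre_ excludes only the inputs where frozen is shorter than arr: there Python A (and B)
-- raise IndexError on frozen[i].
def Pre_canSort (arr : List Int) (frozen : List Int) : Prop := arr.length ≤ frozen.length
instance (arr : List Int) (frozen : List Int) : Decidable (Pre_canSort arr frozen) := by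
  unfold Pre_canSort; infer_instance
def pvWitness_canSort : List Int × List Int := ([1, 3, 2], [0, 1, 0])
def Spec_canSort (arr : List Int) (frozen : List Int) (out : Bool) : Prop := out = canSort_alt arr frozen
instance (arr : List Int) (frozen : List Int) (out : Bool) : Decidable (Spec_canSort arr frozen out) := by
  unfold Spec_canSort; infer_instance

-- ===== CLAIM (what is proved, stated in full; the proofs are below) =====
def Claim_equal_canSort : Prop := ∀ (arr : List Int) (frozen : List Int), Dom_canSort arr frozen → Pre_canSort arr frozen → Spec_canSort arr frozen (canSort arr frozen)

-- ===== LEMMAS AND PROOFS =====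

-- the merged sequence both programs implicitly decide the sortedness of
def mergeL (arr : List Int) (frozen : List Int) : List Int → List Int → List Int
  | [], _ => []
  | i :: rest, free =>
    if PySem.List.pyGetD frozen i 0 ≠ 0 then
      PySem.List.pyGetD arr i 0 :: mergeL arr frozen rest free
    else
      match free with
      | [] => []
      | c :: fs => c :: mergeL arr frozen rest fs

-- the "previous element vs current" chain check
def chainOk : Option Int → List Int → Bool
  | _, [] => true
  | none, c :: l => chainOk (some c) l
  | some p, c :: l => if p > c then false else chainOk (some c) l

-- number of free positions among a list of indices
def freeCount (frozen : List Int) (is : List Int) : Nat :=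
  (is.filter (fun i => PySem.List.pyGetD frozen i 0 == 0)).length

theorem chainOk_some_iff (M : List Int) :
    ∀ p : Int, chainOk (some p) M = true ↔ List.IsChain (· ≤ ·) (p :: M) := by
  induction M with
  | nil => intro p; simp [chainOk]
  | cons c t ih =>
    intro p
    rw [List.isChain_cons_cons]
    by_cases h : p > c
    · simp [chainOk, h, not_le.mpr h]
    · simp [chainOk, h, ih, not_lt.mp h]

theorem chainOk_none_iff (M : List Int) :
    chainOk none M = true ↔ List.IsChain (· ≤ ·) M := by
  cases M with
  | nil => simp [chainOk]
  | cons c t => simpa [chainOk] using chainOk_some_iff t c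

theorem allAdj_eq_chainOk (M : List Int) :
    ((PySem.List.pyRange 0 ((M.length : Int) - 1)).all
      (fun i => !(decide (PySem.List.pyGetD M i 0 > PySem.List.pyGetD M (i + 1) 0))))
    = chainOk none M := by
  rw [← Bool.coe_iff_coe]
  rw [chainOk_none_iff, List.all_eq_true, List.isChain_iff_getElem]
  constructor
  · intro h k hk
    have hmem : (k : Int) ∈ PySem.List.pyRange 0 ((M.length : Int) - 1) := by
      rw [PySem.List.mem_pyRange_one]; omega
    have := h _ hmem
    rw [PySem.List.pyGetD_eq_getElem M 0 (by omega) (by omega)] at this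
    rw [PySem.List.pyGetD_eq_getElem M 0 (by omega) (by omega)] at this
    simp only [Bool.not_eq_true', decide_eq_false_iff_not, not_lt] at this
    simpa using this
  · intro h i hi
    rw [PySem.List.mem_pyRange_one] at hi
    have hk : i.toNat + 1 < M.length := by omega
    rw [PySem.List.pyGetD_eq_getElem M 0 (by omega) (by omega)]
    rw [PySem.List.pyGetD_eq_getElem M 0 (by omega) (by omega)]
    simp only [Bool.not_eq_true', decide_eq_false_iff_not, not_lt]
    have : (i + 1).toNat = i.toNat + 1 := by omega
    simpa [this] using h i.toNat hk

theorem foldl_set_zip (idxs vals : List Int) (h : vals.length = idxs.length) (init : List Int) :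
    (PySem.List.pyRange 0 (idxs.length : Int)).foldl
      (fun sa i => PySem.List.pySetD sa (PySem.List.pyGetD idxs i 0) (PySem.List.pyGetD vals i 0)) init
    = (idxs.zip vals).foldl (fun sa iv => PySem.List.pySetD sa iv.1 iv.2) init := by
  have hlen : (idxs.zip vals).length = idxs.length := by
    rw [List.length_zip, h, min_self]
  have hcongr : (PySem.List.pyRange 0 (idxs.length : Int)).foldl
      (fun sa i => PySem.List.pySetD sa (PySem.List.pyGetD idxs i 0) (PySem.List.pyGetD vals i 0)) init
    = (PySem.List.pyRange 0 ((idxs.zip vals).length : Int)).foldl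
      (fun sa k => PySem.List.pySetD sa (PySem.List.pyGetD (idxs.zip vals) k (0, 0)).1
        (PySem.List.pyGetD (idxs.zip vals) k (0, 0)).2) init := by
    rw [hlen]
    apply PySem.List.foldl_congr_mem
    intro acc k hk
    rw [PySem.List.mem_pyRange_one] at hk
    have hk' : k.toNat < idxs.length := by omega
    have hkv : k.toNat < vals.length := by omega
    have hkz : k.toNat < (idxs.zip vals).length := by omega
    rw [PySem.List.pyGetD_eq_getElem idxs 0 (by omega) (by omega)]
    rw [PySem.List.pyGetD_eq_getElem vals 0 (by omega) (by omega)]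
    rw [PySem.List.pyGetD_eq_getElem (idxs.zip vals) (0, 0) (by omega) (by omega)]
    simp [List.getElem_zip]
  rw [hcongr]
  exact PySem.List.foldl_pyRange_zero_pyGetD' (idxs.zip vals) (0, 0)
    (fun sa iv => PySem.List.pySetD sa iv.1 iv.2) init

theorem setfold_merge (arr frozen : List Int) :
    ∀ (k : Nat) (a : Int) (sa vals : List Int),
      0 ≤ a →
      k = ((arr.length : Int) - a).toNat →
      sa.length = arr.length →
      (∀ j : Int, a ≤ j → PySem.List.pyGetD sa j 0 = PySem.List.pyGetD arr j 0) →
      vals.length = ((PySem.List.pyRange a (arr.length : Int)).filter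
          (fun i => PySem.List.pyGetD frozen i 0 == 0)).length →
      (((PySem.List.pyRange a (arr.length : Int)).filter
          (fun i => PySem.List.pyGetD frozen i 0 == 0)).zip vals).foldl
          (fun sa iv => PySem.List.pySetD sa iv.1 iv.2) sa
        = sa.take a.toNat ++ mergeL arr frozen (PySem.List.pyRange a (arr.length : Int)) vals := by
  intro k
  induction k with
  | zero =>
    intro a sa vals ha hk hlen _ _
    have hle : (arr.length : Int) ≤ a := by omega
    rw [PySem.List.pyRange_one_eq_nil hle]
    simp [mergeL, List.take_of_length_le (by omega : sa.length ≤ a.toNat)]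
  | succ k ih =>
    intro a sa vals ha hk hlen hagree hvals
    have hlt : a < (arr.length : Int) := by omega
    rw [PySem.List.pyRange_one_cons hlt] at *
    have hatn : a.toNat < sa.length := by omega
    by_cases hp : PySem.List.pyGetD frozen a 0 == 0
    · rw [List.filter_cons_of_pos (by simpa using hp)] at *
      cases vals with
      | nil => simp at hvals
      | cons v vs =>
        simp only [List.zip_cons_cons, List.foldl_cons]
        rw [PySem.List.pySetD_of_nonneg sa _ ha]
        have hrec := ih (a + 1) (sa.set a.toNat v) vs (by omega) (by omega)
          (by simpa using hlen)
          (by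
            intro j hj
            rw [PySem.List.pyGetD_of_nonneg _ _ (by omega : (0:Int) ≤ j),
                PySem.List.pyGetD_of_nonneg _ _ (by omega : (0:Int) ≤ j)] at *
            have hne : a.toNat ≠ j.toNat := by omega
            rw [List.getD, List.getD, List.getElem?_set_ne hne]
            have := hagree j (by omega)
            rw [PySem.List.pyGetD_of_nonneg _ _ (by omega : (0:Int) ≤ j),
                PySem.List.pyGetD_of_nonneg _ _ (by omega : (0:Int) ≤ j)] at this
            exact this)
          (by simpa using hvals)
        rw [hrec]
        have h1 : (a + 1).toNat = a.toNat + 1 := by omega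
        rw [h1]
        have htake : (sa.set a.toNat v).take (a.toNat + 1)
            = sa.take a.toNat ++ [v] := by
          rw [List.take_succ]
          congr 1
          · apply List.ext_getElem
            · simp
            · intro n h1' h2'
              have hn : n < a.toNat := by simp at h1'; omega
              simp [List.getElem_take, List.getElem_set_ne (by omega : a.toNat ≠ n)]
          · simp [List.getElem?_set_self (by simpa using hatn)]
        rw [htake]
        have hfz : PySem.List.pyGetD frozen a 0 = 0 := by simpa using hp
        simp [mergeL, hfz]
    · rw [List.filter_cons_of_neg (by simpa using hp)] at *
      have hrec := ih (a + 1) sa vals (by omega) (by omega) hlen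
        (fun j hj => hagree j (by omega)) hvals
      rw [hrec]
      have h1 : (a + 1).toNat = a.toNat + 1 := by omega
      rw [h1, List.take_succ]
      have hget : sa[a.toNat]? = some (PySem.List.pyGetD arr a 0) := by
        have := hagree a (le_refl a)
        rw [PySem.List.pyGetD_eq_getElem sa 0 ha (by omega)] at this
        rw [List.getElem?_eq_getElem hatn, this]
      rw [hget]
      simp only [mergeL, if_pos (by simpa using hp)]
      simp

-- A's value equals the chain check of the merged sequence
theorem A_eq_chain (arr frozen : List Int) :
    canSort arr frozen
    = chainOk none (mergeL arr frozen (PySem.List.pyRange 0 (arr.length : Int))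
        (PySem.List.sorted
          ((PySem.List.pyRange 0 (arr.length : Int)).foldl
            (fun acc i => if PySem.List.pyGetD frozen i 0 == 0 then acc ++ [PySem.List.pyGetD arr i 0] else acc)
            ([] : List Int)) id)) := by
  unfold canSort
  simp only []
  rw [PySem.List.foldl_append_if (fun i => PySem.List.pyGetD frozen i 0 == 0) (fun i => i)]
  rw [PySem.List.foldl_append_if (fun i => PySem.List.pyGetD frozen i 0 == 0)
      (fun i => PySem.List.pyGetD arr i 0)]
  rw [PySem.List.foldl_append_singleton_eq_map (fun i => PySem.List.pyGetD arr i 0)]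
  simp only [List.nil_append, List.map_id']
  set p : Int → Bool := fun i => PySem.List.pyGetD frozen i 0 == 0 with hp
  set idxs := (PySem.List.pyRange 0 (arr.length : Int)).filter p with hidxs
  set vals := PySem.List.sorted (idxs.map (fun i => PySem.List.pyGetD arr i 0)) id with hvals
  have hvlen : vals.length = idxs.length := by
    rw [hvals, PySem.List.length_sorted, List.length_map]
  rw [foldl_set_zip idxs vals hvlen arr]
  have hmerge := setfold_merge arr frozen ((arr.length : Int) - 0).toNat 0 arr vals
    (le_refl 0) rfl rfl (fun _ _ => rfl) (by rw [hvlen, hidxs])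
  rw [← hp] at hmerge
  rw [← hidxs] at hmerge
  rw [hmerge]
  simp only [Int.toNat_zero, List.take_zero, List.nil_append]
  exact allAdj_eq_chainOk _

-- a passing chain starting at v bounds every later element below by v
theorem chain_le (M : List Int) :
    ∀ v : Int, chainOk (some v) M = true → ∀ x ∈ M, v ≤ x := by
  induction M with
  | nil => intro v _ x hx; cases hx
  | cons c l ih =>
    intro v hv x hx
    simp only [chainOk] at hv
    by_cases h : v > c
    · simp [h] at hv
    · rw [if_neg h] at hv
      rcases List.mem_cons.mp hx with rfl | hx'
      · exact not_lt.mp h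
      · exact le_trans (not_lt.mp h) (ih c hv x hx')

-- the head of the pending free list appears in the merge as soon as a free slot remains
theorem head_mem_merge (arr frozen : List Int) :
    ∀ (is : List Int) (h : Int) (fs : List Int),
      0 < freeCount frozen is → h ∈ mergeL arr frozen is (h :: fs) := by
  intro is
  induction is with
  | nil => intro h fs hc; simp [freeCount] at hc
  | cons i rest ih =>
    intro h fs hc
    by_cases hz : PySem.List.pyGetD frozen i 0 = 0
    · simp [mergeL, hz]
    · have : freeCount frozen (i :: rest) = freeCount frozen rest := by
        simp [freeCount, hz]
      rw [this] at hc
      simp only [mergeL, if_pos hz]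
      exact List.mem_cons_of_mem _ (ih h fs hc)

-- if v exceeds the next pending sorted free value, the chain from v fails
theorem chain_false_of_gt_next (arr frozen s : List Int) (rest : List Int) (t : Nat) (v : Int)
    (ht : t < s.length) (hcnt : t + freeCount frozen rest = s.length)
    (hv : s.getD t 0 < v) :
    chainOk (some v) (mergeL arr frozen rest (s.drop t)) = false := by
  have hdrop : s.drop t = s[t] :: s.drop (t + 1) := List.drop_eq_getElem_cons ht
  rw [hdrop]
  have hmem : s[t] ∈ mergeL arr frozen rest (s[t] :: s.drop (t + 1)) :=
    head_mem_merge arr frozen rest s[t] _ (by omega)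
  cases hok : chainOk (some v) (mergeL arr frozen rest (s[t] :: s.drop (t + 1))) with
  | false => rfl
  | true =>
    have := chain_le _ v hok _ hmem
    rw [List.getD_eq_getElem s 0 ht] at hv
    omega

-- invariant linking B's state (t, prev) to the chain check's state pC
def BInv (s : List Int) (t : Nat) (prev pC : Option Int) : Prop :=
  (prev = none ∧ pC = none ∧ t = 0) ∨
  (∃ u, prev = some u ∧ pC = some u ∧
    (0 < t → s.getD (t - 1) 0 ≤ u) ∧ (t < s.length → u ≤ s.getD t 0)) ∨
  (0 < t ∧ pC = some (s.getD (t - 1) 0) ∧ (∀ u, prev = some u → u ≤ s.getD (t - 1) 0))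

theorem go_eq_chain (arr frozen s : List Int) (hs : s.Pairwise (· ≤ ·)) :
    ∀ (is : List Int) (t : Nat) (prev pC : Option Int),
      t + freeCount frozen is = s.length →
      BInv s t prev pC →
      canSortAltGo arr frozen s is (t : Int) prev
        = chainOk pC (mergeL arr frozen is (s.drop t)) := by
  intro is
  induction is with
  | nil =>
    intro t prev pC _ _
    simp only [canSortAltGo, mergeL]
    cases pC <;> rfl
  | cons i rest ih =>
    intro t prev pC hcnt hinv
    have hgt : PySem.List.pyGetD s (t : Int) 0 = s.getD t 0 := by simp
    by_cases hz : PySem.List.pyGetD frozen i 0 = 0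
    · -- free slot: consume s[t]
      have hfc : freeCount frozen (i :: rest) = freeCount frozen rest + 1 := by
        simp [freeCount, hz]
      have hcnt' : (t + 1) + freeCount frozen rest = s.length := by omega
      have hlt : t < s.length := by omega
      have hdrop : s.drop t = s[t] :: s.drop (t + 1) := List.drop_eq_getElem_cons hlt
      have hgd : s.getD t 0 = s[t] := List.getD_eq_getElem s 0 hlt
      have hgd1 : s.getD ((t + 1) - 1) 0 = s[t] := by simpa using hgd
      have hmerge : mergeL arr frozen (i :: rest) (s.drop t)
          = s[t] :: mergeL arr frozen rest (s.drop (t + 1)) := by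
        rw [hdrop]; simp [mergeL, hz]
      have hgo : canSortAltGo arr frozen s (i :: rest) (t : Int) prev
          = canSortAltGo arr frozen s rest (((t + 1 : Nat) : Int)) prev := by
        simp only [canSortAltGo, hz]
        norm_num
      rw [hgo, hmerge]
      rcases hinv with ⟨hp, hc0, ht0⟩ | ⟨u, hp, hc0, hb1, hb2⟩ | ⟨htpos, hc0, hc1⟩
      · subst hp; subst hc0
        rw [ih (t + 1) none (some s[t]) hcnt'
          (Or.inr (Or.inr ⟨by omega, by rw [hgd1], by intro u hu; cases hu⟩))]
        simp [chainOk]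
      · subst hp; subst hc0
        have hule : ¬ u > s[t] := by have := hb2 hlt; rw [hgd] at this; omega
        rw [ih (t + 1) (some u) (some s[t]) hcnt'
          (Or.inr (Or.inr ⟨by omega, by rw [hgd1],
            by intro u' hu'; cases hu'; have := hb2 hlt; rw [hgd1]; omega⟩))]
        simp [chainOk, hule]
      · subst hc0
        have hprev : s.getD (t - 1) 0 ≤ s[t] := by
          have hp1 : t - 1 < s.length := by omega
          rw [List.getD_eq_getElem s 0 hp1]
          exact List.pairwise_iff_getElem.mp hs (t - 1) t hp1 hlt (by omega)
        rw [ih (t + 1) prev (some s[t]) hcnt'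
          (Or.inr (Or.inr ⟨by omega, by rw [hgd1],
            by intro u hu; have := hc1 u hu; rw [hgd1]; omega⟩))]
        have hstep : chainOk (some (s.getD (t - 1) 0))
            (s[t] :: mergeL arr frozen rest (s.drop (t + 1)))
            = chainOk (some s[t]) (mergeL arr frozen rest (s.drop (t + 1))) := by
          simp only [chainOk]
          rw [if_neg (not_lt.mpr hprev)]
        rw [hstep]
    · -- frozen position: emit arr[i]
      have hfc : freeCount frozen (i :: rest) = freeCount frozen rest := by
        simp [freeCount, hz]
      have hcnt' : t + freeCount frozen rest = s.length := by omega
      set v := PySem.List.pyGetD arr i 0 with hv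
      have hmerge : mergeL arr frozen (i :: rest) (s.drop t)
          = v :: mergeL arr frozen rest (s.drop t) := by
        simp [mergeL, hz, hv]
      rw [hmerge]
      have hgo : canSortAltGo arr frozen s (i :: rest) (t : Int) prev
          = (if (match prev with | some p => decide (p > v) | none => false) then false
             else if decide ((t : Int) > 0) && decide (PySem.List.pyGetD s ((t : Int) - 1) 0 > v) then false
             else if decide ((t : Int) < (s.length : Int)) && decide (v > PySem.List.pyGetD s (t : Int) 0) then false
             else canSortAltGo arr frozen s rest (t : Int) (some v)) := by
        simp only [canSortAltGo]
        rw [if_neg (show ¬((PySem.List.pyGetD frozen i 0 == 0) = true) by simpa using hz)]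
      rw [hgo]
      have hgt1 : 0 < t → PySem.List.pyGetD s ((t : Int) - 1) 0 = s.getD (t - 1) 0 := by
        intro ht0
        have hcast : ((t : Int) - 1) = (((t - 1 : Nat)) : Int) := by omega
        rw [hcast]; simp
      have h3t : (t < s.length ∧ s.getD t 0 < v) →
          (decide ((t : Int) < (s.length : Int)) && decide (v > PySem.List.pyGetD s (t : Int) 0)) = true := by
        intro hl
        rw [hgt]
        simp only [Bool.and_eq_true, decide_eq_true_eq]
        exact ⟨by exact_mod_cast hl.1, hl.2⟩
      have h3f : ¬ (t < s.length ∧ s.getD t 0 < v) →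
          (decide ((t : Int) < (s.length : Int)) && decide (v > PySem.List.pyGetD s (t : Int) 0)) = false := by
        intro hl
        rw [hgt]
        by_cases h0 : t < s.length
        · have hv' : ¬ s.getD t 0 < v := fun hh => hl ⟨h0, hh⟩
          have hd : decide (v > s.getD t 0) = false := by
            simp only [decide_eq_false_iff_not]; exact hv'
          rw [hd, Bool.and_false]
        · have h0' : ¬ ((t : Int) < (s.length : Int)) := by exact_mod_cast h0
          simp [h0']
      rcases hinv with ⟨hp, hc0, ht0⟩ | ⟨u, hp, hc0, hb1, hb2⟩ | ⟨htpos, hc0, hc1⟩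
      · -- (a) nothing emitted yet
        subst hp; subst hc0
        have h1 : (match (none : Option Int) with | some p => decide (p > v) | none => false) = false := rfl
        have h2 : (decide ((t : Int) > 0) && decide (PySem.List.pyGetD s ((t : Int) - 1) 0 > v)) = false := by
          have hd : decide ((t : Int) > 0) = false := by
            simp only [decide_eq_false_iff_not, not_lt]; omega
          rw [hd, Bool.false_and]
        have hR : chainOk none (v :: mergeL arr frozen rest (s.drop t))
            = chainOk (some v) (mergeL arr frozen rest (s.drop t)) := rfl
        rw [h1, h2, hR]
        simp only [Bool.false_eq_true, if_false]
        by_cases hloo : t < s.length ∧ s.getD t 0 < v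
        · rw [h3t hloo, if_pos rfl,
            chain_false_of_gt_next arr frozen s rest t v hloo.1 hcnt' hloo.2]
        · rw [h3f hloo]
          simp only [Bool.false_eq_true, if_false]
          exact ih t (some v) (some v) hcnt'
            (Or.inr (Or.inl ⟨v, rfl, rfl, fun ht' => absurd ht' (by omega),
              fun hsl => not_lt.mp (fun hh => hloo ⟨hsl, hh⟩)⟩))
      · -- (b) last emitted was the frozen value u
        subst hp; subst hc0
        have hR : chainOk (some u) (v :: mergeL arr frozen rest (s.drop t))
            = if u > v then false else chainOk (some v) (mergeL arr frozen rest (s.drop t)) := rfl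
        rw [hR]
        by_cases huv : u > v
        · have h1 : (match some u with | some p => decide (p > v) | none => false) = true := by
            simp [huv]
          rw [h1, if_pos rfl, if_pos huv]
        · have h1 : (match some u with | some p => decide (p > v) | none => false) = false := by
            simp [huv]
          have h2 : (decide ((t : Int) > 0) && decide (PySem.List.pyGetD s ((t : Int) - 1) 0 > v)) = false := by
            by_cases ht0 : 0 < t
            · rw [hgt1 ht0]
              have := hb1 ht0
              have hd : decide (s.getD (t - 1) 0 > v) = false := by
                simp only [decide_eq_false_iff_not, not_lt]; omega
              rw [hd, Bool.and_false]
            · have hd : decide ((t : Int) > 0) = false := by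
                simp only [decide_eq_false_iff_not, not_lt]; omega
              rw [hd, Bool.false_and]
          rw [h1, h2]
          simp only [Bool.false_eq_true, if_false]
          rw [if_neg huv]
          by_cases hloo : t < s.length ∧ s.getD t 0 < v
          · rw [h3t hloo, if_pos rfl,
              chain_false_of_gt_next arr frozen s rest t v hloo.1 hcnt' hloo.2]
          · rw [h3f hloo]
            simp only [Bool.false_eq_true, if_false]
            exact ih t (some v) (some v) hcnt'
              (Or.inr (Or.inl ⟨v, rfl, rfl,
                fun ht' => le_trans (hb1 ht') (not_lt.mp huv),
                fun hsl => not_lt.mp (fun hh => hloo ⟨hsl, hh⟩)⟩))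
      · -- (c) last emitted was the free value s[t-1]
        subst hc0
        have hR : chainOk (some (s.getD (t - 1) 0)) (v :: mergeL arr frozen rest (s.drop t))
            = if s.getD (t - 1) 0 > v then false
              else chainOk (some v) (mergeL arr frozen rest (s.drop t)) := rfl
        rw [hR]
        by_cases hwv : s.getD (t - 1) 0 > v
        · rw [if_pos hwv]
          have h2 : (decide ((t : Int) > 0) && decide (PySem.List.pyGetD s ((t : Int) - 1) 0 > v)) = true := by
            rw [hgt1 htpos]
            simp only [Bool.and_eq_true, decide_eq_true_eq]
            exact ⟨by exact_mod_cast htpos, hwv⟩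
          cases hm : (match prev with | some p => decide (p > v) | none => false) with
          | true => rw [if_pos rfl]
          | false =>
            simp only [Bool.false_eq_true, if_false]
            rw [h2, if_pos rfl]
        · rw [if_neg hwv]
          have h2 : (decide ((t : Int) > 0) && decide (PySem.List.pyGetD s ((t : Int) - 1) 0 > v)) = false := by
            rw [hgt1 htpos]
            have hd : decide (s.getD (t - 1) 0 > v) = false := by
              simp only [decide_eq_false_iff_not]; exact hwv
            rw [hd, Bool.and_false]
          cases hm : (match prev with | some p => decide (p > v) | none => false) with
          | true =>
            exfalso
            cases prev with
            | none => simp at hm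
            | some u =>
              simp only [decide_eq_true_eq] at hm
              have := hc1 u rfl
              omega
          | false =>
          simp only [Bool.false_eq_true, if_false]
          rw [h2]
          simp only [Bool.false_eq_true, if_false]
          by_cases hloo : t < s.length ∧ s.getD t 0 < v
          · rw [h3t hloo, if_pos rfl,
              chain_false_of_gt_next arr frozen s rest t v hloo.1 hcnt' hloo.2]
          · rw [h3f hloo]
            simp only [Bool.false_eq_true, if_false]
            exact ih t (some v) (some v) hcnt'
              (Or.inr (Or.inl ⟨v, rfl, rfl,
                fun _ => not_lt.mp hwv,
                fun hsl => not_lt.mp (fun hh => hloo ⟨hsl, hh⟩)⟩))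

-- B's value equals the chain check of the merged sequence
theorem B_eq_chain (arr frozen : List Int) :
    canSort_alt arr frozen
    = chainOk none (mergeL arr frozen (PySem.List.pyRange 0 (arr.length : Int))
        (PySem.List.sorted
          ((PySem.List.pyRange 0 (arr.length : Int)).foldl
            (fun acc i => if PySem.List.pyGetD frozen i 0 == 0 then acc ++ [PySem.List.pyGetD arr i 0] else acc)
            ([] : List Int)) id)) := by
  unfold canSort_alt
  simp only []
  set s := PySem.List.sorted
      ((PySem.List.pyRange 0 (arr.length : Int)).foldl
        (fun acc i => if PySem.List.pyGetD frozen i 0 == 0 then acc ++ [PySem.List.pyGetD arr i 0] else acc)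
        ([] : List Int)) id with hsdef
  have hsort : s.Pairwise (· ≤ ·) := by
    have := PySem.List.sorted_pairwise
      ((PySem.List.pyRange 0 (arr.length : Int)).foldl
        (fun acc i => if PySem.List.pyGetD frozen i 0 == 0 then acc ++ [PySem.List.pyGetD arr i 0] else acc)
        ([] : List Int)) (id : Int → Int)
    simpa [hsdef] using this
  have hcnt : 0 + freeCount frozen (PySem.List.pyRange 0 (arr.length : Int)) = s.length := by
    rw [hsdef, PySem.List.length_sorted]
    rw [PySem.List.foldl_append_if (fun i => PySem.List.pyGetD frozen i 0 == 0)
        (fun i => PySem.List.pyGetD arr i 0)]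
    simp [freeCount]
  have := go_eq_chain arr frozen s hsort (PySem.List.pyRange 0 (arr.length : Int)) 0 none none
    hcnt (Or.inl ⟨rfl, rfl, rfl⟩)
  simpa using this

-- ===== VERDICT (by name: the statement is the Claim_ definition above) =====
theorem canSort_spec : Claim_equal_canSort := by
  intro arr frozen _ _
  unfold Spec_canSort
  rw [A_eq_chain, B_eq_chain]
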